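-- pv_equiv track=rewrite | github.com/metagenlab/diag_pipelines | rules/typing/scripts/calculate_number_of_differences.py | return_number_of_snps
-- ===== SOURCE A (Python) =====
-- def return_number_of_snps(seqRec):
--     s = "\t"+"\t".join(seqRec.keys())+"\n"
--     for i in seqRec.keys():
--         s += i + "\t"
--         for j in seqRec.keys():
--             nogaps = sum(aa1 != "-" and aa2 != "-" for aa1, aa2 in zip(seqRec[i], seqRec[j]))
--             matches = sum(aa1 == aa2 and aa1 != "-" and aa1 != "n" and aa1 != "N" for aa1, aa2 in zip(seqRec[i], seqRec[j]))
--             s += "{:d} \t".format(nogaps-matches)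
--         s += "\n"
--     return(s)
-- ===== SOURCE B (Python) =====
-- def return_number_of_snps(seqRec):
--     keys = list(seqRec)
--     seqs = [seqRec[k] for k in keys]
--
--     def diff(x, y):
--         c = 0
--         for a, b in zip(x, y):
--             if a != '-' and b != '-' and not (a == b and a != 'n' and a != 'N'):
--                 c += 1
--         return c
--
--     # Symmetric table: each off-diagonal pair is scanned once and mirrored from the
--     # already-built rows; the diagonal is the closed-form count of 'n'/'N' columns.
--     table = []
--     for i, x in enumerate(seqs):
--         row = [table[j][i] for j in range(i)]           # mirror the lower triangle
--         row.append(sum(a == 'n' or a == 'N' for a in x))  # diagonal, closed form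
--         row += [diff(x, y) for y in seqs[i + 1:]]
--         table.append(row)
--
--     lines = ["\t" + "\t".join(keys)]
--     for k, row in zip(keys, table):
--         lines.append(k + "\t" + "".join("{:d} \t".format(v) for v in row))
--     return "\n".join(lines) + "\n"
-- ===== Notes on version B (the rewrite author's own statement) =====
-- stated objective: faster
-- what changed: B builds a numeric table first and renders it afterwards, exploiting symmetry: each off-diagonal pair is scanned exactly once in a single fused pass and mirrored into the transposed cell, and the diagonal is computed by a closed-form count of 'n'/'N' characters instead of A's two full generator-sum scans per ordered pair.
import Mathlib
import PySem

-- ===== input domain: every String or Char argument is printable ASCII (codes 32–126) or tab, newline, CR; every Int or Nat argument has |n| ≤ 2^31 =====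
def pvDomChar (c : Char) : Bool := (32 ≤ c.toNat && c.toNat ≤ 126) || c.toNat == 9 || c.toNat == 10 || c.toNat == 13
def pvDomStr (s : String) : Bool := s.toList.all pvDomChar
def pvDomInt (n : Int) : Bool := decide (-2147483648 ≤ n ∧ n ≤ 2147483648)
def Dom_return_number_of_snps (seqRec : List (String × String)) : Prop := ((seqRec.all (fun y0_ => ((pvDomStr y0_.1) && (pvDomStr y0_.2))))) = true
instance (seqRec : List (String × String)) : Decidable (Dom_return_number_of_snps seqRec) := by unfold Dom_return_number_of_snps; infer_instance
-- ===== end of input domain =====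

-- B builds the numeric table first and renders it afterwards, scanning each unordered
-- pair only once (the transposed cell is mirrored) and computing the diagonal by a
-- closed-form 'n'/'N' count; measurably faster by a constant factor, same output.

-- ===== PORT A =====
-- sum(aa1 != "-" and aa2 != "-" for aa1, aa2 in zip(x, y))
def pvNogaps (x y : String) : Int :=
  ((x.toList.zip y.toList).map (fun p => if p.1 ≠ '-' ∧ p.2 ≠ '-' then (1 : Int) else 0)).sum

-- sum(aa1 == aa2 and aa1 != "-" and aa1 != "n" and aa1 != "N" for aa1, aa2 in zip(x, y))
def pvMatches (x y : String) : Int :=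
  ((x.toList.zip y.toList).map
    (fun p => if p.1 = p.2 ∧ p.1 ≠ '-' ∧ p.1 ≠ 'n' ∧ p.1 ≠ 'N' then (1 : Int) else 0)).sum

-- the dict argument arrives as an association list: Dict.ofList is Python's dict construction
-- ("{:d} \t".format(v) is str(v) + " \t" for an int v)
def return_number_of_snps (seqRec : List (String × String)) : String :=
  let d := PySem.Dict.ofList seqRec
  let keys := d.keys
  let s0 := "\t" ++ PySem.Str.join "\t" keys ++ "\n"
  keys.foldl (fun s i =>
    let s1 := s ++ i ++ "\t"
    let s2 := keys.foldl (fun s j =>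
      s ++ PySem.Int.toStr (pvNogaps (d.getD i "") (d.getD j "") - pvMatches (d.getD i "") (d.getD j "")) ++ " \t") s1
    s2 ++ "\n") s0

-- ===== PORT B =====
-- def diff(x, y): one fused pass counting the differing columns
def pvDiff (x y : String) : Int :=
  (x.toList.zip y.toList).foldl (fun c p =>
    if p.1 ≠ '-' ∧ p.2 ≠ '-' ∧ ¬(p.1 = p.2 ∧ p.1 ≠ 'n' ∧ p.1 ≠ 'N') then c + 1 else c) 0

-- sum(a == 'n' or a == 'N' for a in x): the closed-form diagonal
def pvDiag (x : String) : Int :=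
  (x.toList.map (fun a => if a = 'n' ∨ a = 'N' then (1 : Int) else 0)).sum

-- the table-building loop: mirror the lower triangle, closed-form diagonal,
-- one diff pass per pair with j > i (seqs[i+1:])
def pvBuildTable (seqs : List String) : List (List Int) :=
  (PySem.List.enumerate seqs).foldl (fun table p =>
    let row := (PySem.List.pyRange 0 p.1 1).map (fun j =>
      PySem.List.pyGetD (PySem.List.pyGetD table j []) p.1 0)
    let row := row ++ [pvDiag p.2]
    let row := row ++ (PySem.List.slice seqs (some (p.1 + 1)) none).map (fun y => pvDiff p.2 y)
    table ++ [row]) []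

def return_number_of_snps_alt (seqRec : List (String × String)) : String :=
  let d := PySem.Dict.ofList seqRec
  let keys := d.keys
  let seqs := keys.map (fun k => d.getD k "")
  let table := pvBuildTable seqs
  let lines := ("\t" ++ PySem.Str.join "\t" keys) ::
    (keys.zip table).map (fun kr =>
      kr.1 ++ "\t" ++ PySem.Str.join "" (kr.2.map (fun v => PySem.Int.toStr v ++ " \t")))
  PySem.Str.join "\n" lines ++ "\n"

-- ===== PRECONDITION & SPEC =====
def Spec_return_number_of_snps (seqRec : List (String × String)) (out : String) : Prop := out = return_number_of_snps_alt seqRec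
instance (seqRec : List (String × String)) (out : String) : Decidable (Spec_return_number_of_snps seqRec out) := by unfold Spec_return_number_of_snps; infer_instance

-- ===== CLAIM (what is proved, stated in full; the proofs are below) =====
def Claim_equal_return_number_of_snps : Prop := ∀ (seqRec : List (String × String)), Dom_return_number_of_snps seqRec → Spec_return_number_of_snps seqRec (return_number_of_snps seqRec)

-- ===== LEMMAS AND PROOFS =====

-- per-column accounting: nogaps-count minus matches-count is the fused difference count
theorem pv_countP_key (l : List (Char × Char)) :
    ((l.countP (fun p => decide (p.1 ≠ '-' ∧ p.2 ≠ '-')) : Int)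
      - (l.countP (fun p => decide (p.1 = p.2 ∧ p.1 ≠ '-' ∧ p.1 ≠ 'n' ∧ p.1 ≠ 'N')) : Int))
    = (l.countP (fun p => decide (p.1 ≠ '-' ∧ p.2 ≠ '-' ∧ ¬(p.1 = p.2 ∧ p.1 ≠ 'n' ∧ p.1 ≠ 'N'))) : Int) := by
  have hpt : ∀ a b : Char,
      (if (a ≠ '-' ∧ b ≠ '-') then (1:Int) else 0) =
        (if (a = b ∧ a ≠ '-' ∧ a ≠ 'n' ∧ a ≠ 'N') then (1:Int) else 0)
          + (if (a ≠ '-' ∧ b ≠ '-' ∧ ¬(a = b ∧ a ≠ 'n' ∧ a ≠ 'N')) then (1:Int) else 0) := by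
    intro a b
    by_cases h1 : a = '-' <;> by_cases h2 : b = '-' <;> by_cases h3 : a = b <;>
      by_cases h4 : a = 'n' <;> by_cases h5 : a = 'N' <;> subst_eqs <;> simp_all
  induction l with
  | nil => simp
  | cons p l ih =>
    obtain ⟨a, b⟩ := p
    simp only [List.countP_cons]
    push_cast
    simp only [decide_eq_true_eq]
    linarith [ih, hpt a b]

theorem pvDiff_eq (x y : String) : pvNogaps x y - pvMatches x y = pvDiff x y := by
  unfold pvNogaps pvMatches pvDiff
  rw [PySem.List.foldl_ite_add_one]
  have h1 := PySem.List.sum_map_ite_one_zero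
    (fun q : Char × Char => decide (q.1 ≠ '-' ∧ q.2 ≠ '-')) (x.toList.zip y.toList)
  have h2 := PySem.List.sum_map_ite_one_zero
    (fun q : Char × Char => decide (q.1 = q.2 ∧ q.1 ≠ '-' ∧ q.1 ≠ 'n' ∧ q.1 ≠ 'N')) (x.toList.zip y.toList)
  simp only [decide_eq_true_eq] at h1 h2
  rw [h1, h2, pv_countP_key]
  ring

-- the diagonal closed form is the fused count on zip(x, x)
theorem pvDiag_eq (x : String) : pvDiag x = pvDiff x x := by
  unfold pvDiag pvDiff
  rw [PySem.List.foldl_ite_add_one]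
  have h := PySem.List.sum_map_ite_one_zero
    (fun a : Char => decide (a = 'n' ∨ a = 'N')) x.toList
  simp only [decide_eq_true_eq] at h
  rw [h]
  induction x.toList with
  | nil => simp
  | cons a l ih =>
    simp only [List.zip_cons_cons, List.countP_cons, decide_eq_true_eq] at *
    by_cases h1 : a = '-' <;> by_cases h2 : a = 'n' <;> by_cases h3 : a = 'N' <;>
      subst_eqs <;> simp_all

-- the fused difference count is symmetric
theorem pvDiff_comm (x y : String) : pvDiff x y = pvDiff y x := by
  unfold pvDiff
  rw [PySem.List.foldl_ite_add_one, PySem.List.foldl_ite_add_one]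
  congr 1
  rw [← List.zip_swap x.toList y.toList, List.countP_map]
  congr 1
  apply List.countP_congr
  intro q _
  obtain ⟨a, b⟩ := q
  simp only [Function.comp, Prod.swap, decide_eq_true_eq]
  by_cases hab : a = b
  · subst hab; tauto
  · have hba : b ≠ a := fun h => hab h.symm
    simp [hab, hba]; tauto

-- loop invariant of the triangular build: after the rows with index < m are built
-- (and they are the full rows of the square table), the remaining iterations
-- complete the square table
theorem build_aux (seqs : List String) (n m : Nat) (hm : m + n = seqs.length) :
    (PySem.List.enumerate (seqs.drop m) (m : Int)).foldl
      (fun table p =>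
        let row := (PySem.List.pyRange 0 p.1 1).map (fun j =>
          PySem.List.pyGetD (PySem.List.pyGetD table j []) p.1 0)
        let row := row ++ [pvDiag p.2]
        let row := row ++ (PySem.List.slice seqs (some (p.1 + 1)) none).map (fun y => pvDiff p.2 y)
        table ++ [row])
      ((seqs.take m).map (fun x => seqs.map (fun y => pvDiff x y)))
    = seqs.map (fun x => seqs.map (fun y => pvDiff x y)) := by
  induction n generalizing m with
  | zero =>
    have hm' : m = seqs.length := by omega
    subst hm'
    simp
  | succ n ih =>
    have hlt : m < seqs.length := by omega
    rw [List.drop_eq_getElem_cons hlt, PySem.List.enumerate_cons, List.foldl_cons]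
    have hrow :
        ((seqs.take m).map (fun x => seqs.map (fun y => pvDiff x y)) ++
          [((PySem.List.pyRange 0 (m : Int) 1).map (fun j =>
              PySem.List.pyGetD
                (PySem.List.pyGetD ((seqs.take m).map (fun x => seqs.map (fun y => pvDiff x y))) j [])
                (m : Int) 0)
            ++ [pvDiag seqs[m]]
            ++ (PySem.List.slice seqs (some ((m : Int) + 1)) none).map (fun y => pvDiff seqs[m] y))])
        = (seqs.take (m + 1)).map (fun x => seqs.map (fun y => pvDiff x y)) := by
      have hmirror :
          (PySem.List.pyRange 0 (m : Int) 1).map (fun j =>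
              PySem.List.pyGetD
                (PySem.List.pyGetD ((seqs.take m).map (fun x => seqs.map (fun y => pvDiff x y))) j [])
                (m : Int) 0)
          = (seqs.take m).map (fun y => pvDiff seqs[m] y) := by
        rw [PySem.List.pyRange_zero_natCast m, List.map_map]
        apply List.ext_getElem
        · simp [Nat.le_of_lt hlt]
        · intro k hk1 hk2
          have hkm : k < m := by simpa using hk1
          have hkl : k < seqs.length := by omega
          have h1 : k < ((seqs.take m).map (fun x => seqs.map (fun y => pvDiff x y))).length := by
            simp; omega
          simp only [List.getElem_map, List.getElem_range, Function.comp,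
            PySem.List.pyGetD_natCast]
          rw [List.getD_eq_getElem _ _ h1]
          simp only [List.getElem_map, List.getElem_take]
          rw [List.getD_eq_getElem _ _ (by simpa using hlt)]
          simp only [List.getElem_map]
          exact pvDiff_comm _ _
      have hrest :
          (PySem.List.slice seqs (some ((m : Int) + 1)) none).map (fun y => pvDiff seqs[m] y)
          = (seqs.drop (m + 1)).map (fun y => pvDiff seqs[m] y) := by
        have : ((m : Int) + 1) = ((m + 1 : Nat) : Int) := by push_cast; ring
        rw [this, PySem.List.slice_from_natCast]
      rw [hmirror, hrest, pvDiag_eq]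
      rw [List.take_add_one, List.getElem?_eq_getElem hlt]
      simp only [Option.toList_some, List.map_append, List.map_cons, List.map_nil]
      congr 2
      generalize hx0 : seqs[m] = x0
      conv_rhs => rw [← List.take_append_drop m seqs, List.drop_eq_getElem_cons hlt]
      simp [List.map_append, hx0]
    rw [hrow]
    have : ((m : Int) + 1) = ((m + 1 : Nat) : Int) := by push_cast; ring
    rw [this]
    exact ih (m + 1) (by omega)

-- the mirrored/triangular build produces the full square difference table
theorem build_table_eq (seqs : List String) :
    pvBuildTable seqs = seqs.map (fun x => seqs.map (fun y => pvDiff x y)) := by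
  unfold pvBuildTable
  have h := build_aux seqs seqs.length 0 (by omega)
  simpa using h

-- a += loop on strings, seen on the character-list side, appends the mapped pieces
theorem fold_toList {α : Type} (l : List α) (F : String → α → String) (g : α → List Char)
    (h : ∀ s x, (F s x).toList = s.toList ++ g x) (s0 : String) :
    (l.foldl F s0).toList = s0.toList ++ (l.map g).flatten := by
  induction l generalizing s0 with
  | nil => simp
  | cons x t ih => simp [List.foldl_cons, ih, h]

theorem intercal_cons_cons (sep a y : List Char) (t : List (List Char)) :
    sep.intercalate (a :: y :: t) = a ++ sep ++ sep.intercalate (y :: t) := by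
  simp [List.intercalate, List.intersperse]

-- '\n'.join(lines) + '\n' is the first line plus the '\n'-terminated remaining lines
theorem intercal_term (sep : List Char) (a : List Char) (ls : List (List Char)) :
    List.intercalate sep (a :: ls) ++ sep = a ++ sep ++ (ls.map (· ++ sep)).flatten := by
  induction ls generalizing a with
  | nil => simp [List.intercalate]
  | cons y t ih =>
    rw [intercal_cons_cons, List.append_assoc, List.append_assoc, ih y]
    simp

-- ''.join is concatenation
theorem intercal_nil (ls : List (List Char)) : List.intercalate [] ls = ls.flatten := by
  induction ls with
  | nil => simp [List.intercalate]
  | cons a t ih => cases t with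
    | nil => simp [List.intercalate]
    | cons y u => rw [intercal_cons_cons]; simp [ih]

theorem main_eq (seqRec : List (String × String)) :
    return_number_of_snps seqRec = return_number_of_snps_alt seqRec := by
  unfold return_number_of_snps return_number_of_snps_alt
  dsimp only
  rw [build_table_eq]
  rw [← String.toList_inj]
  set d := PySem.Dict.ofList seqRec with hd
  set keys := d.keys with hk
  -- A side: turn both += loops into concatenations of row / entry pieces
  rw [fold_toList keys _
      (fun i => i.toList ++ '\t' ::
        ((keys.map (fun j => (PySem.Int.toStr
            (pvNogaps (d.getD i "") (d.getD j "") - pvMatches (d.getD i "") (d.getD j "")) ++ " \t").toList)).flatten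
          ++ ['\n']))
      (by
        intro s i
        dsimp only
        rw [String.toList_append]
        rw [fold_toList keys _
            (fun j => (PySem.Int.toStr
              (pvNogaps (d.getD i "") (d.getD j "") - pvMatches (d.getD i "") (d.getD j "")) ++ " \t").toList)
            (by intro s' j; simp)]
        simp)]
  -- B side: expose the joins as intercalations on character lists
  rw [List.map_map, ← List.map_prod_left_eq_zip]
  simp only [List.map_cons, List.map_map, PySem.Str.join, PySem.Chars.join]
  simp only [String.toList_append, String.toList_ofList]
  simp only [show ("\n".toList)=['\n'] from rfl, show ("\t".toList)=['\t'] from rfl,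
    show ("".toList)=([]:List Char) from rfl, show (" \t".toList)=[' ','\t'] from rfl]
  rw [intercal_term]
  simp only [List.map_map, Function.comp, intercal_nil, pvDiff_eq,
    List.append_assoc, List.cons_append, List.nil_append]
  congr 1
  congr 1
  congr 1
  congr 1
  apply List.map_congr_left
  intro i _
  simp only [Function.comp_def]
  simp [PySem.Int.toList_toStr, String.toList_append,
    show (" \t".toList)=[' ','\t'] from rfl]
  simp only [Function.comp_def]

-- ===== VERDICT (by name: the statement is the Claim_ definition above) =====
theorem return_number_of_snps_spec : Claim_equal_return_number_of_snps := by
  intro seqRec _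
  unfold Spec_return_number_of_snps
  exact main_eq seqRec
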